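-- pv_equiv track=rewrite | github.com/intazero/Sovereignty-1stROK | Topic Modeling/토픽 보정/tp_utils_1.py | all_tcCombi_generate
-- ===== SOURCE A (Python) =====
-- def all_tcCombi_generate(sepTCs_list, tpWList):
--     tcCombining_dict = {}
--
--     if len(sepTCs_list) == 1: # 입력값이 리스트 요소 단 1개일 때
--         (tc_name, tc_list) = (sepTCs_list[0][0], sepTCs_list[0][1])
--         tcCombining_dict[tc_name] = tc_list
--
--     for i in range(len(sepTCs_list)-1):
--         source = sepTCs_list[i]
--         targets = sepTCs_list[i+1:]
--
--         for target in targets: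
--             combi_tc = list(set(source[1]+target[1]))
--             arr_combi_tc = [tpw for tpw in tpWList if tpw in combi_tc] # combi를 원래 순서대로 재배열
--             tcCombining_dict[source[0]+'_'+target[0][2:]] = arr_combi_tc
--
--     return tcCombining_dict
-- ===== SOURCE B (Python) =====
-- def all_tcCombi_generate(sepTCs_list, tpWList):
--     # Precompute, per topic, the set of positions of tpWList covered by its word list;
--     # each pair's reordered list is then read off the sorted union of two index sets.
--     idx_sets = []
--     for _, tc_list in sepTCs_list:
--         ws = set(tc_list)
--         idx_sets.append({i for i, w in enumerate(tpWList) if w in ws})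
--
--     result = {}
--     if len(sepTCs_list) == 1:
--         result[sepTCs_list[0][0]] = sepTCs_list[0][1]
--
--     n = len(sepTCs_list)
--     for i in range(n):
--         for j in range(i + 1, n):
--             ids = sorted(idx_sets[i] | idx_sets[j])
--             key = sepTCs_list[i][0] + '_' + sepTCs_list[j][0][2:]
--             result[key] = [tpWList[k] for k in ids]
--     return result
-- ===== Notes on version B (the rewrite author's own statement) =====
-- stated objective: faster
-- what changed: B precomputes one set of tpWList-positions per topic word-list (one enumerate pass each), and for every pair reads the reordered list off the sorted union of two index sets, instead of rescanning all of tpWList with a linear list-membership test per word for every pair.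
import Mathlib
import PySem

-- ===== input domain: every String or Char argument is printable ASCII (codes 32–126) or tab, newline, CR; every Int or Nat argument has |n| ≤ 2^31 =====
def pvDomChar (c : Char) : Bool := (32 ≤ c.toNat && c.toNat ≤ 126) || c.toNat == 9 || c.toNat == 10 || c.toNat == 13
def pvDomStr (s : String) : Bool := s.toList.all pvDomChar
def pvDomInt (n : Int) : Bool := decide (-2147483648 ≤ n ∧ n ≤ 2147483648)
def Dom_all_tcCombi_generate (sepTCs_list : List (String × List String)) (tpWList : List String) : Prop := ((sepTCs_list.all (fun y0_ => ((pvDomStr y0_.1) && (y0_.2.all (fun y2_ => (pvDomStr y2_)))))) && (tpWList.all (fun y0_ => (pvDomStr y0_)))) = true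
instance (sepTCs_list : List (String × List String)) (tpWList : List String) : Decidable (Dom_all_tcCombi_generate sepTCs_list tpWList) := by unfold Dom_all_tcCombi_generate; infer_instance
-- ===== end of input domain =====

-- B precomputes one index set per topic and reads each pair's reordered list off the
-- sorted union of two index sets, instead of rescanning tpWList with a list-membership
-- test per word for every pair (objective: faster).

-- ===== PORT A =====
def all_tcCombi_generate (sepTCs_list : List (String × List String)) (tpWList : List String) : List (String × List String) :=
  let tcCombining_dict : PySem.Dict String (List String) :=
    if sepTCs_list.length == 1 then
      PySem.Dict.insert PySem.Dict.empty (PySem.List.pyGetD sepTCs_list 0 ("", [])).1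
        (PySem.List.pyGetD sepTCs_list 0 ("", [])).2
    else PySem.Dict.empty
  let d :=
    (PySem.List.pyRange 0 (PySem.List.len sepTCs_list - 1) 1).foldl (fun d i =>
      let source := PySem.List.pyGetD sepTCs_list i ("", [])
      let targets := PySem.List.slice sepTCs_list (some (i + 1)) none
      targets.foldl (fun d target =>
        let combi_tc := PySem.Set.ofList (source.2 ++ target.2)
        let arr_combi_tc := tpWList.filter (fun tpw => combi_tc.contains tpw)
        PySem.Dict.insert d (source.1 ++ "_" ++ PySem.Str.slice target.1 (some 2) none) arr_combi_tc) d)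
      tcCombining_dict
  d.items

-- ===== PORT B =====
-- {i for i, w in enumerate(tpWList) if w in ws}  (indices are strictly increasing, so already a set)
def pvIdxList (tpWList : List String) (ws : PySem.Set String) : List Int :=
  (PySem.List.enumerate tpWList 0).filterMap (fun iw => if ws.contains iw.2 then some iw.1 else none)

def pvIdxSet (tpWList : List String) (p : String × List String) : PySem.Set Int :=
  PySem.Set.ofList (pvIdxList tpWList (PySem.Set.ofList p.2))

def all_tcCombi_generate_alt (sepTCs_list : List (String × List String)) (tpWList : List String) : List (String × List String) :=
  let idx_sets : List (PySem.Set Int) := sepTCs_list.map (pvIdxSet tpWList)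
  let result : PySem.Dict String (List String) :=
    if sepTCs_list.length == 1 then
      PySem.Dict.insert PySem.Dict.empty (PySem.List.pyGetD sepTCs_list 0 ("", [])).1
        (PySem.List.pyGetD sepTCs_list 0 ("", [])).2
    else PySem.Dict.empty
  let n : Int := PySem.List.len sepTCs_list
  let d :=
    (PySem.List.pyRange 0 n 1).foldl (fun d i =>
      (PySem.List.pyRange (i + 1) n 1).foldl (fun d j =>
        let ids := PySem.List.sorted
          (PySem.Set.union (PySem.List.pyGetD idx_sets i []) (PySem.List.pyGetD idx_sets j []))
          (fun x => x) false
        let key := (PySem.List.pyGetD sepTCs_list i ("", [])).1 ++ "_" ++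
          PySem.Str.slice (PySem.List.pyGetD sepTCs_list j ("", [])).1 (some 2) none
        PySem.Dict.insert d key (ids.map (fun k => PySem.List.pyGetD tpWList k ""))) d)
      result
  d.items

-- ===== PRECONDITION & SPEC =====
def Spec_all_tcCombi_generate (sepTCs_list : List (String × List String)) (tpWList : List String) (out : List (String × List String)) : Prop := out = all_tcCombi_generate_alt sepTCs_list tpWList
instance (sepTCs_list : List (String × List String)) (tpWList : List String) (out : List (String × List String)) : Decidable (Spec_all_tcCombi_generate sepTCs_list tpWList out) := by unfold Spec_all_tcCombi_generate; infer_instance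

-- ===== CLAIM (what is proved, stated in full; the proofs are below) =====
def Claim_equal_all_tcCombi_generate : Prop := ∀ (sepTCs_list : List (String × List String)) (tpWList : List String), Dom_all_tcCombi_generate sepTCs_list tpWList → Spec_all_tcCombi_generate sepTCs_list tpWList (all_tcCombi_generate sepTCs_list tpWList)

-- ===== LEMMAS AND PROOFS =====

-- A's per-pair body, as a named function (source fixed, target the loop variable).
def pvG (W : List String) (source : String × List String) (d : PySem.Dict String (List String))
    (target : String × List String) : PySem.Dict String (List String) :=
  PySem.Dict.insert d (source.1 ++ "_" ++ PySem.Str.slice target.1 (some 2) none)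
    (W.filter (fun tpw => (PySem.Set.ofList (source.2 ++ target.2)).contains tpw))

-- pvIdxList generalized over the enumerate start, for induction.
def pvJ (xs : List String) (s : Int) (P : String → Bool) : List Int :=
  (PySem.List.enumerate xs s).filterMap (fun iw => if P iw.2 then some iw.1 else none)

theorem pvIdxList_eq_pvJ (W : List String) (ws : PySem.Set String) :
    pvIdxList W ws = pvJ W 0 (fun w => ws.contains w) := rfl

theorem pvJ_nil (s : Int) (P : String → Bool) : pvJ [] s P = [] := rfl

theorem pvJ_cons (x : String) (xs : List String) (s : Int) (P : String → Bool) :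
    pvJ (x :: xs) s P = if P x then s :: pvJ xs (s+1) P else pvJ xs (s+1) P := by
  simp only [pvJ, PySem.List.enumerate_cons, List.filterMap_cons]
  cases hP : P x <;> simp [hP]

theorem pvJ_lb {xs : List String} {s k : Int} {P : String → Bool} (h : k ∈ pvJ xs s P) : s ≤ k := by
  induction xs generalizing s with
  | nil => simp [pvJ_nil] at h
  | cons x xs ih =>
    rw [pvJ_cons] at h
    split at h
    · rcases List.mem_cons.mp h with h' | h'
      · omega
      · have := ih h'; omega
    · have := ih h; omega

theorem pvJ_pairwise (xs : List String) (s : Int) (P : String → Bool) :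
    (pvJ xs s P).Pairwise (· < ·) := by
  induction xs generalizing s with
  | nil => simp [pvJ_nil]
  | cons x xs ih =>
    rw [pvJ_cons]
    split
    · exact List.Pairwise.cons (fun k hk => by have := pvJ_lb hk; omega) (ih (s+1))
    · exact ih (s+1)

theorem pvJ_nodup (xs : List String) (s : Int) (P : String → Bool) : (pvJ xs s P).Nodup :=
  (pvJ_pairwise xs s P).imp (fun h => ne_of_lt h)

theorem pvJ_mem_or (P1 P2 : String → Bool) (xs : List String) (s k : Int) :
    k ∈ pvJ xs s (fun w => P1 w || P2 w) ↔ k ∈ pvJ xs s P1 ∨ k ∈ pvJ xs s P2 := by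
  induction xs generalizing s with
  | nil => simp [pvJ_nil]
  | cons x xs ih =>
    rw [pvJ_cons, pvJ_cons, pvJ_cons]
    cases h1 : P1 x <;> cases h2 : P2 x <;>
      simp [h1, h2, List.mem_cons, ih] <;> tauto

theorem pvJ_map_get (full : List String) : ∀ (xs : List String) (s : Int) (P : String → Bool),
    (∀ (j : Nat), j < xs.length → PySem.List.pyGetD full (s + (j : Int)) "" = xs.getD j "") →
    (pvJ xs s P).map (fun k => PySem.List.pyGetD full k "") = xs.filter P
  | [], _, _, _ => rfl
  | x :: xs, s, P, h => by
    rw [pvJ_cons]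
    have h0 : PySem.List.pyGetD full s "" = x := by
      have := h 0 (by simp); simpa using this
    have htail : ∀ (j : Nat), j < xs.length → PySem.List.pyGetD full ((s+1) + (j : Int)) "" = xs.getD j "" := by
      intro j hj
      have := h (j+1) (by simpa using Nat.succ_lt_succ hj)
      push_cast at this
      rw [show s + 1 + (j : Int) = s + ((j : Int) + 1) by ring]
      simpa using this
    cases hP : P x <;>
      simp [hP, List.filter_cons, pvJ_map_get full xs (s+1) P htail, h0]

-- the value computed by B for one pair equals the value computed by A for that pair
theorem pvValue (W : List String) (p q : String × List String) :
    (PySem.List.sorted (PySem.Set.union (pvIdxSet W p) (pvIdxSet W q)) (fun x => x) false).map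
      (fun k => PySem.List.pyGetD W k "")
    = W.filter (fun tpw => (PySem.Set.ofList (p.2 ++ q.2)).contains tpw) := by
  have hsorted : PySem.List.sorted (PySem.Set.union (pvIdxSet W p) (pvIdxSet W q)) (fun x => x) false
      = pvJ W 0 (fun w => (PySem.Set.ofList p.2).contains w || (PySem.Set.ofList q.2).contains w) := by
    apply PySem.List.sorted_eq_of_perm_of_pairwise_lt
    · rw [List.perm_ext_iff_of_nodup
        (pvJ_nodup W 0 (fun w => (PySem.Set.ofList p.2).contains w || (PySem.Set.ofList q.2).contains w))
        (PySem.Set.nodup_union (pvIdxSet W p) (pvIdxSet W q) (PySem.Set.nodup_ofList _))]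
      intro k
      simp only [pvIdxSet, pvIdxList_eq_pvJ, PySem.Set.mem_union, PySem.Set.mem_ofList]
      exact pvJ_mem_or _ _ W 0 k
    · exact pvJ_pairwise W 0 _
  rw [hsorted, pvJ_map_get W W 0 _ (by intro j hj; simp)]
  apply List.filter_congr
  intro w _
  simp [Bool.eq_iff_iff, PySem.Set.contains_iff, PySem.Set.mem_ofList]

theorem pvIdxSet_default (W : List String) : pvIdxSet W ("", ([] : List String)) = ([] : PySem.Set Int) := by
  have h1 : pvIdxList W ([] : PySem.Set String) = [] := by
    rw [pvIdxList, List.filterMap_eq_nil_iff]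
    intro iw _
    simp [PySem.Set.contains]
  show PySem.Set.ofList (pvIdxList W (PySem.Set.ofList ([] : List String))) = ([] : PySem.Set Int)
  rw [show PySem.Set.ofList ([] : List String) = ([] : PySem.Set String) from rfl, h1]
  rfl

-- B's inner loop over j, rewritten as A's inner loop over the dropped suffix with pvG as body
theorem pvInnerB (W : List String) (L : List (String × List String)) (i : Int) (hi : 0 ≤ i)
    (d : PySem.Dict String (List String)) :
    (PySem.List.pyRange (i + 1) (PySem.List.len L) 1).foldl
      (fun d j =>
        PySem.Dict.insert d
          ((PySem.List.pyGetD L i ("", [])).1 ++ "_" ++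
            PySem.Str.slice (PySem.List.pyGetD L j ("", [])).1 (some 2) none)
          ((PySem.List.sorted
              (PySem.Set.union (PySem.List.pyGetD (L.map (pvIdxSet W)) i [])
                (PySem.List.pyGetD (L.map (pvIdxSet W)) j []))
              (fun x => x) false).map (fun k => PySem.List.pyGetD W k ""))) d
    = (List.drop (i + 1).toNat L).foldl (fun d target => pvG W (PySem.List.pyGetD L i ("", [])) d target) d := by
  have hmap : ∀ r : Int, PySem.List.pyGetD (L.map (pvIdxSet W)) r [] = pvIdxSet W (PySem.List.pyGetD L r ("", [])) := by
    intro r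
    rw [← pvIdxSet_default W]
    exact PySem.List.pyGetD_map (pvIdxSet W) L r ("", [])
  simp only [hmap]
  have h2 := PySem.List.foldl_pyRange_pyGetD L ("", [])
    (fun d target =>
      PySem.Dict.insert d
        ((PySem.List.pyGetD L i ("", [])).1 ++ "_" ++ PySem.Str.slice target.1 (some 2) none)
        ((PySem.List.sorted (PySem.Set.union (pvIdxSet W (PySem.List.pyGetD L i ("", []))) (pvIdxSet W target))
            (fun x => x) false).map (fun k => PySem.List.pyGetD W k "")))
    d (show (0 : Int) ≤ i + 1 by omega)
  refine h2.trans ?_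
  apply PySem.List.foldl_congr_mem
  intro acc x _
  rw [pvValue W (PySem.List.pyGetD L i ("", [])) x]
  rfl

-- ===== VERDICT (by name: the statement is the Claim_ definition above) =====
theorem all_tcCombi_generate_spec : Claim_equal_all_tcCombi_generate := by
  intro L W _
  unfold Spec_all_tcCombi_generate all_tcCombi_generate all_tcCombi_generate_alt
  dsimp only
  apply congrArg PySem.Dict.items
  have hA : ∀ d : PySem.Dict String (List String),
      (PySem.List.pyRange 0 (PySem.List.len L - 1) 1).foldl (fun d i =>
        (PySem.List.slice L (some (i + 1)) none).foldl
          (fun d target => pvG W (PySem.List.pyGetD L i ("", [])) d target) d) d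
      = (PySem.List.pyRange 0 (PySem.List.len L - 1) 1).foldl (fun d i =>
          (List.drop (i + 1).toNat L).foldl
            (fun d target => pvG W (PySem.List.pyGetD L i ("", [])) d target) d) d := by
    intro d
    apply PySem.List.foldl_congr_mem
    intro acc i hi
    have hb := PySem.List.mem_pyRange_one.mp hi
    rw [PySem.List.slice_from L (show (0:Int) ≤ i + 1 by omega)]
  have hB : ∀ d : PySem.Dict String (List String),
      (PySem.List.pyRange 0 (PySem.List.len L) 1).foldl (fun d i =>
        (PySem.List.pyRange (i + 1) (PySem.List.len L) 1).foldl (fun d j =>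
          PySem.Dict.insert d
            ((PySem.List.pyGetD L i ("", [])).1 ++ "_" ++
              PySem.Str.slice (PySem.List.pyGetD L j ("", [])).1 (some 2) none)
            ((PySem.List.sorted
                (PySem.Set.union (PySem.List.pyGetD (L.map (pvIdxSet W)) i [])
                  (PySem.List.pyGetD (L.map (pvIdxSet W)) j []))
                (fun x => x) false).map (fun k => PySem.List.pyGetD W k ""))) d) d
      = (PySem.List.pyRange 0 (PySem.List.len L) 1).foldl (fun d i =>
          (List.drop (i + 1).toNat L).foldl
            (fun d target => pvG W (PySem.List.pyGetD L i ("", [])) d target) d) d := by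
    intro d
    apply PySem.List.foldl_congr_mem
    intro acc i hi
    have hb := PySem.List.mem_pyRange_one.mp hi
    exact pvInnerB W L i (by omega) acc
  have hshrink : ∀ d : PySem.Dict String (List String),
      (PySem.List.pyRange 0 (PySem.List.len L) 1).foldl (fun d i =>
        (List.drop (i + 1).toNat L).foldl
          (fun d target => pvG W (PySem.List.pyGetD L i ("", [])) d target) d) d
      = (PySem.List.pyRange 0 (PySem.List.len L - 1) 1).foldl (fun d i =>
          (List.drop (i + 1).toNat L).foldl
            (fun d target => pvG W (PySem.List.pyGetD L i ("", [])) d target) d) d := by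
    intro d
    have hlen : PySem.List.len L = (L.length : Int) := by simp
    rcases Nat.eq_zero_or_pos L.length with h0 | h0
    · rw [PySem.List.pyRange_one_eq_nil (by omega), PySem.List.pyRange_one_eq_nil (by omega)]
    · rw [PySem.List.pyRange_one_append 0 (PySem.List.len L - 1) (PySem.List.len L) (by omega) (by omega),
        List.foldl_append]
      have hsing := PySem.List.pyRange_one_singleton (PySem.List.len L - 1)
      rw [show PySem.List.len L - 1 + 1 = PySem.List.len L from by ring] at hsing
      rw [hsing]
      simp only [List.foldl_cons, List.foldl_nil]
      rw [show (PySem.List.len L - 1 + 1).toNat = L.length from by omega, List.drop_length]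
      rfl
  exact (hA _).trans ((hshrink _).symm.trans (hB _).symm)
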